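-- pv_equiv track=rewrite | github.com/shabanskaya/Data-Structures-Algorithms-in-Python | Part-2/контесты/07C2.py | dfs
-- ===== SOURCE A (Python) =====
-- def dfs(a, j) :
-- 	s = []
-- 	ind = [0]*len(a)
-- 	s.append( (j, a[j]) )
-- 	i = 1
-- 	while len(s)>0:
-- 		if ind[s[-1][0]] == 0:
-- 			ind[s[-1][0]] = i
-- 			i += 1
-- 			for e in s[-1][1] :
-- 				s.append((e, a[e]))
-- 		else:
-- 			s.pop()
--
-- 	return ind
-- ===== SOURCE B (Python) =====
-- def dfs(a, j):
--     ind = [0] * len(a)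
--     ind[j] = 1
--     i = 2
--     stack = [(a[j][::-1], 0)]
--     while stack:
--         r, p = stack[-1]
--         while p < len(r) and ind[r[p]] != 0:
--             p += 1
--         if p == len(r):
--             stack.pop()
--         else:
--             e = r[p]
--             stack[-1] = (r, p + 1)
--             ind[e] = i
--             i += 1
--             stack.append((a[e][::-1], 0))
--     return ind
-- ===== Notes on version B (the rewrite author's own statement) =====
-- stated objective: alternative
-- what changed: A runs an eager stack machine that pushes a (neighbor, adjacency-list) pair for every neighbor of every visited node (duplicates included) and re-tests each entry when it surfaces; B keeps at most one frame per active node, each holding the reversed adjacency list and a resume pointer, marks nodes at discovery time and skips already-visited neighbors by advancing the pointer, so no node ever sits on the stack twice.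
-- outside the precondition, e.g. on dfs([[], [7]], 0): A returns [1, 0], B returns [1, 0]
import Mathlib
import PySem

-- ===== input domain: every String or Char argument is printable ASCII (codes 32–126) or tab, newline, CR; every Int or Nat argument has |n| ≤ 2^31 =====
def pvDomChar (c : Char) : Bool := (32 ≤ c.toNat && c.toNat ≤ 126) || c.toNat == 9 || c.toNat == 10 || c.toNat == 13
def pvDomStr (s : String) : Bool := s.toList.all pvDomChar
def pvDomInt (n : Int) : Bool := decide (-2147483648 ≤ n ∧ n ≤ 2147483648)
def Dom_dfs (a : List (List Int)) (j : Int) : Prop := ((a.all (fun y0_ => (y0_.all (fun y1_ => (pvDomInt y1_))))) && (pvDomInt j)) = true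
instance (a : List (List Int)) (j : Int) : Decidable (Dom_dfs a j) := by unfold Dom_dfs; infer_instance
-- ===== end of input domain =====

-- B replaces A's eager stack machine (one stack entry per examined neighbor, duplicates included,
-- each re-tested when it surfaces) by a lazy one-frame-per-active-node stack with a resume pointer
-- into the reversed adjacency list, marking nodes at discovery; same discovery numbering, O(V)
-- instead of O(E) stack entries ("alternative": same asymptotic time).

-- ===== PORT A =====
-- lemmas the ports' termination proofs cite (facts about pySet?/count, nothing about the programs)
theorem pv_count_set_lt (xs : List Int) (n : Nat) (v : Int) (h : n < xs.length)
    (h0 : xs[n] = 0) (hv : v ≠ 0) : (xs.set n v).count 0 < xs.count 0 := by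
  have hxs : xs = xs.take n ++ xs[n] :: xs.drop (n + 1) := by
    conv_lhs => rw [← List.take_append_drop n xs, ← List.getElem_cons_drop h]
  rw [List.set_eq_take_cons_drop v h]
  conv_rhs => rw [hxs]
  simp only [List.count_append, List.count_cons, h0]
  have : (v == 0) = false := by simpa using hv
  simp [this]

theorem pv_set_decr (xs : List Int) (u v : Int) (ind' : List Int)
    (hg : PySem.List.pyGet? xs u = some 0) (hs : PySem.List.pySet? xs u v = some ind')
    (hv : v ≠ 0) : ind'.count 0 < xs.count 0 ∧ ind'.length = xs.length := by
  simp only [PySem.List.pySet?, Option.map_eq_some_iff] at hs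
  obtain ⟨m, hm, hset⟩ := hs
  simp only [PySem.List.pyGet?, hm, Option.bind_some] at hg
  have hlt : m < xs.length := by
    by_contra hc
    rw [List.getElem?_eq_none (by omega)] at hg
    simp at hg
  rw [List.getElem?_eq_getElem hlt] at hg
  refine ⟨?_, by simp [← hset]⟩
  subst hset
  exact pv_count_set_lt xs m v hlt (by simpa using hg) hv

def dfsLoop (a : List (List Int)) (s : List (Int × List Int)) (ind : List Int) (k : Nat) :
    List Int :=
  match s with
  | [] => ind
  | (u, adj) :: rest =>
    match hg : PySem.List.pyGet? ind u with
    | none => ind                 -- ind[s[-1][0]] raises IndexError: outside Pre_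
    | some v =>
      if hv : v = 0 then
        match hs : PySem.List.pySet? ind u ((k : Int) + 1) with
        | none => ind             -- unreachable: pyGet? at the same index just succeeded
        | some ind' =>
          match adj.mapM (fun e => (PySem.List.pyGet? a e).map (fun l => (e, l))) with
          | none => ind'          -- some a[e] raises IndexError while pushing: outside Pre_
          | some ps => dfsLoop a (ps.reverse ++ (u, adj) :: rest) ind' (k + 1)
      else dfsLoop a rest ind k
termination_by (ind.count 0, s.length)
decreasing_by
  · exact Prod.Lex.left _ _ (pv_set_decr ind u _ ind' (hv ▸ hg) hs (by omega)).1
  · exact Prod.Lex.right _ (by simp [List.length_cons])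

def dfs (a : List (List Int)) (j : Int) : List Int :=
  let ind := List.replicate a.length (0 : Int)
  match PySem.List.pyGet? a j with
  | none => ind                   -- a[j] raises IndexError: outside Pre_
  | some adj => dfsLoop a [(j, adj)] ind 0

-- ===== PORT B =====
-- the inner `while p < len(r) and ind[r[p]] != 0: p += 1` of Source B (none = the IndexError)
def dfsSkip (ind r : List Int) (p : Nat) : Option Nat :=
  if h : p < r.length then
    match PySem.List.pyGet? ind r[p] with
    | none => none
    | some v => if v = 0 then some p else dfsSkip ind r (p + 1)
  else some p
termination_by r.length - p

theorem dfsSkip_spec (ind r : List Int) (p q : Nat) (h : dfsSkip ind r p = some q) :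
    p ≤ q ∧ ∀ hq : q < r.length, PySem.List.pyGet? ind r[q] = some 0 := by
  fun_induction dfsSkip ind r p
  case case1 => simp at h
  case case2 p' hp hg =>
    obtain rfl : p' = q := by simpa using h
    exact ⟨le_refl _, fun _ => hg⟩
  case case3 p' hp v hg hv ih =>
    obtain ⟨h1, h3⟩ := ih h
    exact ⟨by omega, h3⟩
  case case4 p' hp =>
    obtain rfl : p' = q := by simpa using h
    exact ⟨le_refl _, fun hq => absurd hq hp⟩

def dfsLoopB (a : List (List Int)) (fs : List (List Int × Nat)) (ind : List Int) (k : Nat) :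
    List Int :=
  match fs with
  | [] => ind
  | (r, p) :: rest =>
    match hq : dfsSkip ind r p with
    | none => ind                 -- ind[r[p]] raises IndexError: outside Pre_
    | some q =>
      if h : q < r.length then
        match hs : PySem.List.pySet? ind r[q] ((k : Int) + 1) with
        | none => ind             -- unreachable: dfsSkip just read this index
        | some ind' =>
          match PySem.List.pyGet? a r[q] with
          | none => ind'          -- a[e] raises IndexError: outside Pre_
          | some adje => dfsLoopB a ((adje.reverse, 0) :: (r, q + 1) :: rest) ind' (k + 1)
      else dfsLoopB a rest ind k
termination_by (ind.count 0, fs.length)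
decreasing_by
  · exact Prod.Lex.left _ _
      (pv_set_decr ind r[q] _ ind' ((dfsSkip_spec ind r p q hq).2 h) hs (by omega)).1
  · exact Prod.Lex.right _ (by simp [List.length_cons])

def dfs_alt (a : List (List Int)) (j : Int) : List Int :=
  let ind := List.replicate a.length (0 : Int)
  match PySem.List.pySet? ind j 1, PySem.List.pyGet? a j with
  | some ind1, some adj => dfsLoopB a [(adj.reverse, 0)] ind1 1
  | _, _ => ind                   -- ind[j] / a[j] raises IndexError: outside Pre_

-- ===== PRECONDITION & SPEC =====
-- Pre_ admits the inputs on which every index A touches is in range: j and every adjacency entry.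
-- It also excludes inputs whose only out-of-range entries sit in lists A never reaches (A returns
-- there); whether such an entry is reached is graph reachability, not a closed-form input shape.
def Pre_dfs (a : List (List Int)) (j : Int) : Prop :=
  PySem.Raise.InRange a.length j ∧ ∀ l ∈ a, ∀ e ∈ l, PySem.Raise.InRange a.length e
instance (a : List (List Int)) (j : Int) : Decidable (Pre_dfs a j) := by
  unfold Pre_dfs; infer_instance

def pvWitness_dfs : List (List Int) × Int := ([[1], [0]], 0)

def Spec_dfs (a : List (List Int)) (j : Int) (out : List Int) : Prop := out = dfs_alt a j
instance (a : List (List Int)) (j : Int) (out : List Int) : Decidable (Spec_dfs a j out) := by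
  unfold Spec_dfs; infer_instance

-- ===== CLAIM (what is proved, stated in full; the proofs are below) =====
def Claim_equal_dfs : Prop :=
  ∀ (a : List (List Int)) (j : Int), Dom_dfs a j → Pre_dfs a j → Spec_dfs a j (dfs a j)

-- ===== LEMMAS AND PROOFS =====

-- a node already carrying a nonzero discovery index
def pvMarked (ind : List Int) (u : Int) : Prop :=
  ∃ v, PySem.List.pyGet? ind u = some v ∧ v ≠ 0

-- the adjacency list a[e] (total form; only used where e is in range)
def pvAdj (a : List (List Int)) (e : Int) : List Int := (PySem.List.pyGet? a e).getD []

-- simulation relation: A's stack (head = top) decomposed into B's frames — each B frame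
-- (a[u].reverse, p) accounts for the still-unexamined entries of a marked node u plus u's own
-- sentinel entry that A pops when it resurfaces.
inductive pvRel (a : List (List Int)) (ind : List Int) : List (Int × List Int) → List (List Int × Nat) → Prop
  | nil : pvRel a ind [] []
  | cons (u : Int) (adjU : List Int) (p : Nat) (S : List (Int × List Int))
      (fs : List (List Int × Nat)) :
      PySem.List.pyGet? a u = some adjU → pvMarked ind u → p ≤ adjU.reverse.length →
      pvRel a ind S fs →
      pvRel a ind ((adjU.reverse.drop p).map (fun e => (e, pvAdj a e)) ++ (u, adjU) :: S)
        ((adjU.reverse, p) :: fs)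

theorem pv_inRange_idx (n : Nat) (i : Int) (h : PySem.Raise.InRange n i) :
    ∃ m, PySem.List.pyIdx? n i = some m ∧ m < n := by
  obtain ⟨h1, h2⟩ := h
  unfold PySem.List.pyIdx?
  by_cases h0 : 0 ≤ i
  · exact ⟨i.toNat, by simp [h0, h2], by omega⟩
  · refine ⟨n - (-i).toNat, by simp [h0, h1], by omega⟩

theorem pv_get_idx {α : Type} (xs : List α) (i : Int) (m : Nat)
    (hm : PySem.List.pyIdx? xs.length i = some m) (hlt : m < xs.length) :
    PySem.List.pyGet? xs i = some xs[m] := by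
  simp [PySem.List.pyGet?, hm, List.getElem?_eq_getElem hlt]

theorem pv_set_idx {α : Type} (xs : List α) (i : Int) (m : Nat) (v : α)
    (hm : PySem.List.pyIdx? xs.length i = some m) :
    PySem.List.pySet? xs i v = some (xs.set m v) := by
  simp [PySem.List.pySet?, hm]

theorem pv_marked_set (ind ind' : List Int) (u x : Int) (v : Int) (m : Nat)
    (hm : PySem.List.pyIdx? ind.length u = some m) (hlt : m < ind.length)
    (hset : ind' = ind.set m v) (hv : v ≠ 0) (hmk : pvMarked ind x) : pvMarked ind' x := by
  obtain ⟨w, hw, hw0⟩ := hmk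
  simp only [pvMarked, PySem.List.pyGet?] at hw ⊢
  have hlen : ind'.length = ind.length := by simp [hset]
  rw [hlen]
  cases hx : PySem.List.pyIdx? ind.length x with
  | none => rw [hx] at hw; simp at hw
  | some mx =>
    rw [hx] at hw
    simp only [Option.bind_some] at hw ⊢
    have hmx : mx < ind.length := by
      by_contra hc
      rw [List.getElem?_eq_none (by omega)] at hw
      simp at hw
    rw [List.getElem?_eq_getElem hmx] at hw
    rw [List.getElem?_eq_getElem (by omega : mx < ind'.length)]
    have hww : ind[mx] = w := by injection hw
    by_cases hx' : mx = m
    · subst hx' hset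
      exact ⟨v, by simp [List.getElem_set_self], hv⟩
    · subst hset
      refine ⟨w, ?_, hw0⟩
      rw [List.getElem_set]
      rw [if_neg (fun hh : m = mx => hx' hh.symm), hww]

theorem pv_rel_mono (a : List (List Int)) (ind ind' : List Int)
    (S : List (Int × List Int)) (fs : List (List Int × Nat))
    (hlen : ind'.length = ind.length) (hmk : ∀ x, pvMarked ind x → pvMarked ind' x)
    (h : pvRel a ind S fs) : pvRel a ind' S fs := by
  induction h with
  | nil => exact pvRel.nil
  | cons u adjU p S fs hadj hm hp hrel ih =>
    exact pvRel.cons u adjU p S fs hadj (hmk u hm) hp ih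

theorem pv_mapM_pairs (a : List (List Int)) (l : List Int)
    (h : ∀ e ∈ l, PySem.Raise.InRange a.length e) :
    l.mapM (fun e => (PySem.List.pyGet? a e).map (fun ll => (e, ll))) =
      some (l.map (fun e => (e, pvAdj a e))) := by
  induction l with
  | nil => rfl
  | cons e rest ih =>
    obtain ⟨m, hm, hlt⟩ := pv_inRange_idx a.length e (h e (by simp))
    rw [List.mapM_cons, pv_get_idx a e m hm hlt, ih (fun x hx => h x (by simp [hx]))]
    simp [pvAdj, pv_get_idx a e m hm hlt]

-- one visited-neighbor skip on B's side: the frame's pointer advances by one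
theorem pv_loopB_skip (a : List (List Int)) (r : List Int) (p : Nat)
    (fs : List (List Int × Nat)) (ind : List Int) (k : Nat)
    (h : dfsSkip ind r p = dfsSkip ind r (p + 1)) :
    dfsLoopB a ((r, p) :: fs) ind k = dfsLoopB a ((r, p + 1) :: fs) ind k := by
  rw [dfsLoopB, dfsLoopB, h]

theorem pv_sim (a : List (List Int)) (hE : ∀ l ∈ a, ∀ e ∈ l, PySem.Raise.InRange a.length e) :
    ∀ (c m : Nat) (ind : List Int) (S : List (Int × List Int)) (fs : List (List Int × Nat))
      (k : Nat), ind.count 0 ≤ c → S.length ≤ m → ind.length = a.length →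
      pvRel a ind S fs → dfsLoop a S ind k = dfsLoopB a fs ind k := by
  intro c
  induction c using Nat.strong_induction_on with
  | _ c IHc =>
  intro m
  induction m with
  | zero =>
    intro ind S fs k _ hm _ hrel
    cases hrel with
    | nil => rw [dfsLoop, dfsLoopB]
    | cons u adjU p S' fs' hadj hmk hp hrel' => simp at hm
  | succ m IHm =>
    intro ind S fs k hc hm hlen hrel
    cases hrel with
    | nil => rw [dfsLoop, dfsLoopB]
    | cons u adjU p S' fs' hadj hmk hp hrel' =>
      by_cases hpl : p < adjU.reverse.length
      · -- the frame still has unexamined entries; the next one is e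
        have hdrop : adjU.reverse.drop p = adjU.reverse[p] :: adjU.reverse.drop (p + 1) :=
          (List.getElem_cons_drop hpl).symm
        set e := adjU.reverse[p] with he
        have hmem : e ∈ adjU := by
          have := List.getElem_mem hpl
          rwa [List.mem_reverse] at this
        have hrng : PySem.Raise.InRange a.length e :=
          hE adjU (PySem.List.mem_of_pyGet?_eq_some a hadj) e hmem
        obtain ⟨n, hn, hnlt⟩ := pv_inRange_idx a.length e hrng
        have hn' : PySem.List.pyIdx? ind.length e = some n := by rw [hlen]; exact hn
        have hnlt' : n < ind.length := by omega
        have hget : PySem.List.pyGet? ind e = some ind[n] := pv_get_idx ind e n hn' hnlt'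
        by_cases hv : ind[n] = 0
        · -- e is unvisited: both sides mark it with k+1 and descend into a[e]
          have hget0 : PySem.List.pyGet? ind e = some 0 := by rw [hget, hv]
          have hadje : PySem.List.pyGet? a e = some a[n] := pv_get_idx a e n hn hnlt
          have hpvadj : pvAdj a e = a[n] := by simp [pvAdj, hadje]
          have hset : PySem.List.pySet? ind e ((k : Int) + 1) =
              some (ind.set n ((k : Int) + 1)) := pv_set_idx ind e n ((k : Int) + 1) hn'
          have hlen' : (ind.set n ((k : Int) + 1)).length = a.length := by
            simp [hlen]
          have hmapm := pv_mapM_pairs a a[n] (fun x hx => hE a[n] (List.getElem_mem hnlt) x hx)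
          have hdecr := pv_set_decr ind e ((k : Int) + 1) _ hget0 hset (by omega)
          have hmarkmono : ∀ x, pvMarked ind x → pvMarked (ind.set n ((k : Int) + 1)) x :=
            fun x hx => pv_marked_set ind _ e x ((k : Int) + 1) n hn' hnlt' rfl (by omega) hx
          have hmarkede : pvMarked (ind.set n ((k : Int) + 1)) e := by
            refine ⟨(k : Int) + 1, ?_, by omega⟩
            have hn2 : PySem.List.pyIdx? (ind.set n ((k : Int) + 1)).length e = some n := by
              simpa using hn'
            rw [pv_get_idx _ e n hn2 (by simpa using hnlt')]
            simp
          -- A side: mark e, push the pairs of a[e]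
          rw [hdrop, List.map_cons, List.cons_append, dfsLoop, hget0]
          split
          · next heq => simp at heq
          next v heq =>
          obtain rfl : (0 : Int) = v := by simpa using heq
          rw [dif_pos rfl, hpvadj, hset, hmapm]
          split
          · next heq2 => simp at heq2
          next ind2 heq2 =>
          obtain rfl : ind.set n ((k : Int) + 1) = ind2 := by simpa using heq2
          split
          · next heq5 => simp at heq5
          next ps heq5 =>
          obtain rfl : List.map (fun e => (e, pvAdj a e)) a[n] = ps := by simpa using heq5
          -- B side: skip stops at p, e is marked, a new frame is pushed
          have hskip0 : dfsSkip ind adjU.reverse p = some p := by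
            rw [dfsSkip, dif_pos hpl, hget0]; simp
          rw [dfsLoopB, hskip0]
          split
          · next heq3 => simp at heq3
          next q heq3 =>
          obtain rfl : p = q := by simpa using heq3
          rw [dif_pos hpl, hset]
          split
          · next heq4 => simp at heq4
          next ind3 heq4 =>
          obtain rfl : ind.set n ((k : Int) + 1) = ind3 := by simpa using heq4
          rw [hadje]
          rw [← List.map_reverse]
          refine IHc ((ind.set n ((k : Int) + 1)).count 0) (by omega) _ _ _ _ (k + 1)
            (le_refl _) (le_refl _) hlen' ?_
          have h0 : List.map (fun e => (e, pvAdj a e)) a[n].reverse =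
              List.map (fun e => (e, pvAdj a e)) (a[n].reverse.drop 0) := by simp
          rw [hpvadj] at *
          rw [h0]
          exact pvRel.cons e a[n] 0 _ _ hadje hmarkede (by simp)
            (pvRel.cons u adjU (p + 1) S' fs' hadj (hmarkmono u hmk) (by omega)
              (pv_rel_mono a ind _ S' fs' (by simp) hmarkmono hrel'))
        · -- e is already visited: A pops its stack entry, B advances the frame pointer
          rw [hdrop, List.map_cons, List.cons_append, dfsLoop, hget]
          split
          · next heq => simp at heq
          next v' heq =>
          obtain rfl : ind[n] = v' := by simpa using heq
          rw [dif_neg hv]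
          have hstep : dfsSkip ind adjU.reverse p = dfsSkip ind adjU.reverse (p + 1) := by
            conv_lhs => rw [dfsSkip]
            rw [dif_pos hpl, hget]
            simp [hv]
          rw [pv_loopB_skip a adjU.reverse p fs' ind k hstep]
          refine IHm ind _ _ k hc ?_ hlen
            (pvRel.cons u adjU (p + 1) S' fs' hadj hmk (by omega) hrel')
          rw [hdrop] at hm
          simp at hm ⊢
          omega
      · -- the frame is exhausted: A pops the sentinel (u is marked), B pops the frame
        have hple : adjU.reverse.length ≤ p := by omega
        have hdrop : adjU.reverse.drop p = [] := List.drop_eq_nil_of_le hple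
        obtain ⟨v, hvu, hv0⟩ := hmk
        rw [hdrop, List.map_nil, List.nil_append]
        rw [dfsLoop, dfsLoopB]
        have hskip : dfsSkip ind adjU.reverse p = some p := by
          rw [dfsSkip, dif_neg hpl]
        rw [hskip, hvu]
        simp only [hv0, dif_neg hpl]
        exact IHm ind S' fs' k hc (by simp at hm ⊢; omega) hlen hrel'

theorem dfs_spec_aux (a : List (List Int)) (j : Int)
    (hj : PySem.Raise.InRange a.length j)
    (hE : ∀ l ∈ a, ∀ e ∈ l, PySem.Raise.InRange a.length e) : dfs a j = dfs_alt a j := by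
  obtain ⟨nj, hnj, hnjlt⟩ := pv_inRange_idx a.length j hj
  have hlen0 : (List.replicate a.length (0 : Int)).length = a.length := by simp
  have hnj' : PySem.List.pyIdx? (List.replicate a.length (0 : Int)).length j = some nj := by
    rw [hlen0]; exact hnj
  have hgetaj : PySem.List.pyGet? a j = some a[nj] := pv_get_idx a j nj hnj hnjlt
  have hget0 : PySem.List.pyGet? (List.replicate a.length (0 : Int)) j = some 0 := by
    rw [pv_get_idx _ j nj hnj' (by simpa using hnjlt)]; simp
  have hset : PySem.List.pySet? (List.replicate a.length (0 : Int)) j 1 =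
      some ((List.replicate a.length (0 : Int)).set nj 1) :=
    pv_set_idx _ j nj 1 hnj'
  have hmapm := pv_mapM_pairs a a[nj] (fun x hx => hE a[nj] (List.getElem_mem hnjlt) x hx)
  have hlen1 : ((List.replicate a.length (0 : Int)).set nj 1).length = a.length := by simp
  have hmarked : pvMarked ((List.replicate a.length (0 : Int)).set nj 1) j := by
    refine ⟨1, ?_, one_ne_zero⟩
    rw [pv_get_idx _ j nj (by simpa using hnj') (by simpa using hnjlt)]
    congr 1
    rw [List.getElem_set]
    simp
  simp only [dfs, dfs_alt]
  rw [hgetaj, hset]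
  split
  · next heqA => simp at heqA
  next adjA heqA =>
  obtain rfl : a[nj] = adjA := by simpa using heqA
  split
  case h_2 => next x y hf => exact (hf _ _ rfl rfl).elim
  next ind1 adjB heqB1 heqB2 =>
  obtain rfl : (List.replicate a.length (0 : Int)).set nj 1 = ind1 := by simpa using heqB1
  obtain rfl : a[nj] = adjB := by simpa using heqB2
  -- reduce A's first loop iteration: j is marked with 1 and a[j]'s pairs are pushed
  rw [dfsLoop, hget0]
  split
  · next heq => simp at heq
  next v heq =>
  obtain rfl : (0 : Int) = v := by simpa using heq
  rw [dif_pos rfl]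
  rw [show ((0 : Nat) : Int) + 1 = (1 : Int) by simp, hset, hmapm]
  split
  · next heq2 => simp at heq2
  next ind2 heq2 =>
  obtain rfl : (List.replicate a.length (0 : Int)).set nj 1 = ind2 := by simpa using heq2
  split
  · next heq3 => simp at heq3
  next ps heq3 =>
  obtain rfl : List.map (fun e => (e, pvAdj a e)) a[nj] = ps := by simpa using heq3
  rw [← List.map_reverse]
  refine pv_sim a hE (((List.replicate a.length (0 : Int)).set nj 1).count 0) _ _ _ _ 1
    (le_refl _) (le_refl _) hlen1 ?_
  have hpv : pvAdj a j = a[nj] := by simp [pvAdj, hgetaj]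
  have h0 : List.map (fun e => (e, pvAdj a e)) a[nj].reverse =
      List.map (fun e => (e, pvAdj a e)) (a[nj].reverse.drop 0) := by simp
  rw [h0]
  exact pvRel.cons j a[nj] 0 [] [] hgetaj hmarked (by simp) pvRel.nil

-- ===== VERDICT (by name: the statement is the Claim_ definition above) =====
theorem dfs_spec : Claim_equal_dfs := by
  intro a j _ hpre
  exact dfs_spec_aux a j hpre.1 hpre.2
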